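-- pv_equiv track=rewrite | github.com/shasky2014/PythonLearning | cpt4/weiyunsuandemo.py | state_explode_map
-- ===== SOURCE A (Python) =====
-- def state_explode_map(a, map_json):
--     map_list = dict({1: "缺少招生群助手", 2: "缺少话术助手", 4: "机器人心跳不正常", 8: "近似满员", 32: "群二维码过期", 64: "满员", 128: "二维码分享者中不在群中"})
--
--     a_explore = {}
--     for n, _one in enumerate(str(bin(a)).replace('0b', '')):
--         if _one == '1':
--             x_bin_str = _one + ''.join(['0'] * (len(str(bin(a)).replace('0b', '')) - n - 1))
--             a_explore[int(x_bin_str, 2)] = map_list[int(x_bin_str, 2)]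
--     return a_explore
-- ===== SOURCE B (Python) =====
-- # B: decode flags by scanning the known flag table in descending bit order
-- # (matches A's MSB-first insertion order), instead of parsing bin(a) strings.
-- def state_explode_map(a, map_json):
--     flags = [(128, "二维码分享者中不在群中"), (64, "满员"), (32, "群二维码过期"),
--              (8, "近似满员"), (4, "机器人心跳不正常"), (2, "缺少话术助手"),
--              (1, "缺少招生群助手")]
--     n = abs(a)
--     return {v: msg for v, msg in flags if n & v}
-- ===== Notes on version B (the rewrite author's own statement) =====
-- stated objective: idiomatic
-- what changed: B scans the fixed flag table in descending bit order and tests each flag with a bitwise AND against abs(a), instead of A's rebuilding bin(a) as a string for every character, slicing off a suffix of zeros and re-parsing it with int(_, 2).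
import Mathlib
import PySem

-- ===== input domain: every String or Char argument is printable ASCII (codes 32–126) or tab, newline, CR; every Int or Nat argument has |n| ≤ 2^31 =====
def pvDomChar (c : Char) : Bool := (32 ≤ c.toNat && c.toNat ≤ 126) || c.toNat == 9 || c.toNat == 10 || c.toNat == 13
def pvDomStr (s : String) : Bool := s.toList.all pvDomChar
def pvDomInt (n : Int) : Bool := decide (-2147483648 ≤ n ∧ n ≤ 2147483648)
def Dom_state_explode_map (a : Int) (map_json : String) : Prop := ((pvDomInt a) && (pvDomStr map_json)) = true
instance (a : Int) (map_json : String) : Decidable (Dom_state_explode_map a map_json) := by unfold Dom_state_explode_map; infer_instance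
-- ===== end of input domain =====

-- B decodes the flags by scanning the fixed flag table in descending bit order instead of
-- parsing the string bin(a); idiomatic, same cost. Equivalence is on the return value.

-- ===== PORT A =====
-- binary digits of n, MSB first ([] for 0); used to build str(bin(a)).replace('0b','')
def pvBitsGo : Nat → Nat → List Char
  | _, 0 => []
  | 0, _+1 => []   -- unreachable: fuel ≥ n suffices
  | fuel+1, n+1 => pvBitsGo fuel ((n+1)/2) ++ [if (n+1) % 2 = 1 then '1' else '0']

def pvBits (n : Nat) : List Char := pvBitsGo n n

-- str(bin(a)).replace('0b','') as a list of chars (exact: '-' prefix for negatives, '0' for 0)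
def pvBinStr (a : Int) : List Char :=
  (if a < 0 then ['-'] else []) ++ (if a.natAbs = 0 then ['0'] else pvBits a.natAbs)

-- int(s, 2) for strings of '1'/'0' digits (hand port, exact on such strings; the only
-- strings A feeds it are '1' followed by '0's)
def pvParseBin2 (s : List Char) : Int :=
  s.foldl (fun acc c => 2 * acc + (if c = '1' then 1 else 0)) 0

def pvMapList : PySem.Dict Int String :=
  PySem.Dict.ofList [(1, "缺少招生群助手"), (2, "缺少话术助手"), (4, "机器人心跳不正常"),
                     (8, "近似满员"), (32, "群二维码过期"), (64, "满员"),
                     (128, "二维码分享者中不在群中")]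

def state_explode_map (a : Int) (map_json : String) : List (Int × String) :=
  let s := pvBinStr a
  let a_explore : PySem.Dict Int String :=
    (PySem.List.enumerate s).foldl
      (fun d p =>
        if p.2 = '1' then
          let x_bin_str := p.2 :: List.replicate (((s.length : Int) - p.1 - 1).toNat) '0'
          let v := pvParseBin2 x_bin_str
          -- map_list[v]: KeyError for keys outside the map is excluded by Pre_
          d.insert v (pvMapList.getD v "")
        else d)
      PySem.Dict.empty
  a_explore.items

-- ===== PORT B =====
def pvFlags : List (Int × String) :=
  [(128, "二维码分享者中不在群中"), (64, "满员"), (32, "群二维码过期"),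
   (8, "近似满员"), (4, "机器人心跳不正常"), (2, "缺少话术助手"), (1, "缺少招生群助手")]

def state_explode_map_alt (a : Int) (map_json : String) : List (Int × String) :=
  let n : Nat := a.natAbs
  (pvFlags.foldl
    (fun d p => if n &&& p.1.natAbs ≠ 0 then d.insert p.1 p.2 else d)
    (PySem.Dict.empty : PySem.Dict Int String)).items

-- ===== PRECONDITION & SPEC =====
-- Pre_ excludes exactly the inputs whose magnitude has a set bit outside the map's keys
-- {1,2,4,8,32,64,128} (mask 239): there A raises KeyError (e.g. a = 16).
def Pre_state_explode_map (a : Int) (map_json : String) : Prop :=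
  a.natAbs &&& 239 = a.natAbs
instance (a : Int) (map_json : String) : Decidable (Pre_state_explode_map a map_json) := by
  unfold Pre_state_explode_map; infer_instance

def pvWitness_state_explode_map : Int × String := (5, "")

def Spec_state_explode_map (a : Int) (map_json : String) (out : List (Int × String)) : Prop :=
  out = state_explode_map_alt a map_json
instance (a : Int) (map_json : String) (out : List (Int × String)) :
    Decidable (Spec_state_explode_map a map_json out) := by
  unfold Spec_state_explode_map; infer_instance

-- ===== CLAIM (what is proved, stated in full; the proofs are below) =====
def Claim_equal_state_explode_map : Prop := ∀ (a : Int) (map_json : String),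
  Dom_state_explode_map a map_json → Pre_state_explode_map a map_json →
  Spec_state_explode_map a map_json (state_explode_map a map_json)

-- ===== LEMMAS AND PROOFS =====
-- neither port looks at map_json
theorem pvA_mj (a : Int) (mj : String) : state_explode_map a mj = state_explode_map a "" := rfl
theorem pvB_mj (a : Int) (mj : String) : state_explode_map_alt a mj = state_explode_map_alt a "" := rfl

-- the ports agree on every magnitude admitted by Pre_, for both signs (finite check)
set_option maxRecDepth 40000 in
theorem pvKey : ∀ i : Fin 240, ((i : Nat) &&& 239 = (i : Nat)) →
    state_explode_map ((i : Nat) : Int) "" = state_explode_map_alt ((i : Nat) : Int) "" ∧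
    state_explode_map (-((i : Nat) : Int)) "" = state_explode_map_alt (-((i : Nat) : Int)) "" := by
  decide

-- ===== VERDICT (by name: the statement is the Claim_ definition above) =====
theorem state_explode_map_spec : Claim_equal_state_explode_map := by
  intro a mj _ hpre
  unfold Spec_state_explode_map
  rw [pvA_mj, pvB_mj]
  have hle : a.natAbs ≤ 239 := by
    have := Nat.and_le_right (n := a.natAbs) (m := 239)
    unfold Pre_state_explode_map at hpre
    omega
  have hlt : a.natAbs < 240 := by omega
  have h := pvKey ⟨a.natAbs, hlt⟩ hpre
  rcases Int.natAbs_eq a with he | he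
  · rw [he]; exact h.1
  · rw [he]; exact h.2
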